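-- pv_equiv track=rewrite | github.com/snowthebear/SPOJ | ABCPATH.py | bfs
-- ===== SOURCE A (Python) =====
-- from queue import Queue
--
-- def bfs(table, visited):
--     starts = []
--
--     for i in range (len(table)):
--         for j in range (len(table[i])):
--             if table[i][j] == 'A':
--                 starts.append((i, j))
--
--
--     total = 0
--     for start in starts:
--         q = Queue()
--         q.put((start, 1)) #start step 1
--         visited[start[0]][start[1]] = True
--
--         current_total = 1
--
--         while not q.empty():
--             (x, y), steps = q.get()
--             directions = [(0, 1), (0, -1), (1, 0), (-1, 0), (1, 1), (1, -1), (-1, 1), (-1, -1)]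
--
--             for xpoint, ypoint in directions:
--                 nx, ny = xpoint + x, ypoint + y
--
--                 if 0 <= nx < len(table) and 0 <= ny < len(table[0]) and table[nx][ny] == chr(ord(table[x][y]) + 1):
--                     if not visited[nx][ny]:
--                         visited[nx][ny] = True
--                         q.put(((nx, ny), steps+1))
--
--                         current_total = max(current_total, steps+1)
--
--         total = max(total, current_total)
--
--     return total
-- ===== SOURCE B (Python) =====
-- def bfs(table, visited):
--     # Iterative DFS per 'A' cell (fused scan, no starts list, no per-node step
--     # counters: the chain length of a reached cell is ord(letter) - ord('A') + 1).
--     total = 0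
--     for i in range(len(table)):
--         for j in range(len(table[i])):
--             if table[i][j] == 'A':
--                 visited[i][j] = True
--                 stack = [(i, j)]
--                 best = 1
--                 while stack:
--                     x, y = stack.pop()
--                     best = max(best, ord(table[x][y]) - 64)
--                     for dx, dy in ((0, 1), (0, -1), (1, 0), (-1, 0),
--                                    (1, 1), (1, -1), (-1, 1), (-1, -1)):
--                         nx, ny = x + dx, y + dy
--                         if 0 <= nx < len(table) and 0 <= ny < len(table[0]) \
--                                 and table[nx][ny] == chr(ord(table[x][y]) + 1) \
--                                 and not visited[nx][ny]:
--                             visited[nx][ny] = True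
--                             stack.append((nx, ny))
--                 total = max(total, best)
--     return total
-- ===== Notes on version B (the rewrite author's own statement) =====
-- stated objective: alternative
-- what changed: Replaces the two-phase queue-based BFS (precollected starts list, queue.Queue of ((x,y),steps) pairs, best updated at enqueue time) by a fused single scan that runs an iterative depth-first search with a plain list stack of cells from each 'A' cell, deriving the chain length arithmetically as ord(letter)-ord('A')+1 at pop time instead of threading step counters.
-- outside the precondition, e.g. on bfs([['A', 'C']], [[True]]): A returns 1, B returns 1
import Mathlib
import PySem

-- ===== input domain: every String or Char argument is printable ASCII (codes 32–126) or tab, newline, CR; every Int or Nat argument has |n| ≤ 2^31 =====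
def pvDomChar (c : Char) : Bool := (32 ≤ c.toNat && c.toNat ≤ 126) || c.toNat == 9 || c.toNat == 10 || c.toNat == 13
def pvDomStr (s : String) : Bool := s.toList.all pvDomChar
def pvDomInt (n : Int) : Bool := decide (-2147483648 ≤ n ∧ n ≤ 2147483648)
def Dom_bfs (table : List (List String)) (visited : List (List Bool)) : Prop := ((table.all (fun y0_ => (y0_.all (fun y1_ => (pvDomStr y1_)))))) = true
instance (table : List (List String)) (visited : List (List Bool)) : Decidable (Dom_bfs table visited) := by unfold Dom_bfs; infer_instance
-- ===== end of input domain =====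

-- B replaces A's two-phase queue BFS (starts list, FIFO queue of ((x,y),steps))
-- by a fused scan running an iterative stack DFS from each 'A' cell, deriving the
-- chain length as ord(letter)-64 at pop time; the return value AND the final
-- visited mutation coincide (the equivalence proved here is about the return value).

-- shared low-level index primitives (both Pythons use the identical subscript
-- expressions; every call site is guarded `0 <= i`, so Python's negative-index
-- wrap is unreachable and a guarded total read is exact; writes out of range
-- cannot occur inside Pre_bfs, where Python would raise IndexError)
def cellAt (t : List (List String)) (x y : Int) : String :=
  if 0 ≤ x ∧ 0 ≤ y then ((t.getD x.toNat []).getD y.toNat "") else ""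

def get2 (v : List (List Bool)) (x y : Int) : Bool :=
  if 0 ≤ x ∧ 0 ≤ y then ((v.getD x.toNat []).getD y.toNat false) else false

def set2 (v : List (List Bool)) (x y : Int) : List (List Bool) :=
  if 0 ≤ x ∧ 0 ≤ y then v.modify x.toNat (fun row => row.set y.toNat true) else v

-- Python ord(s): every string it is applied to in either program is "A" or a
-- one-character chr(...) result, so the default for an empty string is unreachable
def pyOrd (s : String) : Int := ((s.toList.headD 'A').toNat : Int)

-- Python chr(ord(s) + 1); cells are printable ASCII on Dom, so the code is valid
def succStr (s : String) : String := String.ofList [Char.ofNat ((pyOrd s).toNat + 1)]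

-- len(table[0]) — only evaluated when the grid is nonempty
def widthT (t : List (List String)) : Nat := (t.headD []).length

def pyDirs : List (Int × Int) :=
  [(0, 1), (0, -1), (1, 0), (-1, 0), (1, 1), (1, -1), (-1, 1), (-1, -1)]

-- sufficient fuel for the while loops: every iteration pops one entry and every
-- push marks a distinct unvisited in-range cell, so pops ≤ (cells of visited) + 1;
-- sufficiency is proved in the loop lemmas below
def fuelFor (v : List (List Bool)) : Nat := (v.map List.length).sum + 1

-- ===== PORT A =====
-- one direction step of A's inner `for xpoint, ypoint in directions` loop
def bfsInnerA (t : List (List String)) (x y steps : Int)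
    (st : List ((Int × Int) × Int) × List (List Bool) × Int) (d : Int × Int) :
    List ((Int × Int) × Int) × List (List Bool) × Int :=
  let nx := d.1 + x
  let ny := d.2 + y
  if 0 ≤ nx ∧ nx < (t.length : Int) ∧ 0 ≤ ny ∧ ny < (widthT t : Int) ∧
      cellAt t nx ny = succStr (cellAt t x y) then
    if get2 st.2.1 nx ny = false then
      (st.1 ++ [((nx, ny), steps + 1)], set2 st.2.1 nx ny, max st.2.2 (steps + 1))
    else st
  else st

-- A's `while not q.empty()` loop: FIFO queue of ((x,y),steps)
def bfsLoopA (t : List (List String)) :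
    Nat → List ((Int × Int) × Int) → List (List Bool) → Int → List (List Bool) × Int
  | 0, _, v, b => (v, b)
  | _ + 1, [], v, b => (v, b)
  | fuel + 1, ((x, y), steps) :: rest, v, b =>
      let st := pyDirs.foldl (bfsInnerA t x y steps) (rest, v, b)
      bfsLoopA t fuel st.1 st.2.1 st.2.2

-- A's first phase: collect the 'A' cells
def startsOf (t : List (List String)) : List (Int × Int) :=
  (List.range t.length).foldl (fun acc (i : Nat) =>
    (List.range (t.getD i []).length).foldl (fun acc2 (j : Nat) =>
      if cellAt t (i : Int) (j : Int) = "A" then acc2 ++ [((i : Int), (j : Int))] else acc2) acc) []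

def bfs (table : List (List String)) (visited : List (List Bool)) : Int :=
  (startsOf table).foldl (fun (st : List (List Bool) × Int) s =>
      let v1 := set2 st.1 s.1 s.2
      let r := bfsLoopA table (fuelFor v1) [((s.1, s.2), 1)] v1 1
      (r.1, max st.2 r.2)) (visited, 0) |>.2

-- ===== PORT B =====
-- one direction step of B's inner loop (single combined condition)
def bfsInnerB (t : List (List String)) (x y : Int)
    (st : List (Int × Int) × List (List Bool)) (d : Int × Int) :
    List (Int × Int) × List (List Bool) :=
  let nx := d.1 + x
  let ny := d.2 + y
  if 0 ≤ nx ∧ nx < (t.length : Int) ∧ 0 ≤ ny ∧ ny < (widthT t : Int) ∧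
      cellAt t nx ny = succStr (cellAt t x y) ∧ get2 st.2 nx ny = false then
    (st.1 ++ [(nx, ny)], set2 st.2 nx ny)
  else st

-- B's `while stack` loop: stack.pop() takes the LAST element; best is updated at
-- pop time from the letter: ord(table[x][y]) - 64
def bfsLoopB (t : List (List String)) :
    Nat → List (Int × Int) → List (List Bool) → Int → List (List Bool) × Int
  | 0, _, v, b => (v, b)
  | _ + 1, [], v, b => (v, b)
  | fuel + 1, c :: cs, v, b =>
      let p := (c :: cs).getLast (List.cons_ne_nil c cs)
      let rest := (c :: cs).dropLast
      let b1 := max b (pyOrd (cellAt t p.1 p.2) - 64)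
      let st := pyDirs.foldl (bfsInnerB t p.1 p.2) (rest, v)
      bfsLoopB t fuel st.1 st.2 b1

def bfs_alt (table : List (List String)) (visited : List (List Bool)) : Int :=
  ((List.range table.length).foldl (fun (st : List (List Bool) × Int) (i : Nat) =>
      (List.range (table.getD i []).length).foldl (fun st2 (j : Nat) =>
        if cellAt table (i : Int) (j : Int) = "A" then
          let v1 := set2 st2.1 (i : Int) (j : Int)
          let r := bfsLoopB table (fuelFor v1) [((i : Int), (j : Int))] v1 1
          (r.1, max st2.2 r.2)
        else st2) st) (visited, 0)).2

-- ===== PRECONDITION & SPEC =====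
-- Pre_ excludes (only when the grid contains an 'A') inputs where `visited` does
-- not cover the grid's shape or some row is shorter than row 0: there A's BFS can
-- index table/visited out of range and raise IndexError.  Whether it actually
-- raises depends on which cells are reachable, which is not closed-form, so this
-- sufficient shape condition also excludes some inputs on which A still returns
-- (see cites; with no 'A' in the grid neither program touches `visited`, and such
-- inputs stay inside Pre_).
def Pre_bfs (table : List (List String)) (visited : List (List Bool)) : Prop :=
  (∃ r ∈ table, "A" ∈ r) →
    (table.length ≤ visited.length ∧ ∀ k ∈ List.range table.length,
      widthT table ≤ (table.getD k []).length ∧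
      (table.getD k []).length ≤ (visited.getD k []).length)

instance (table : List (List String)) (visited : List (List Bool)) :
    Decidable (Pre_bfs table visited) := by unfold Pre_bfs; infer_instance

def pvWitness_bfs : List (List String) × List (List Bool) :=
  ([["A", "B"], ["D", "C"]], [[false, false], [false, false]])

def Spec_bfs (table : List (List String)) (visited : List (List Bool)) (out : Int) : Prop :=
  out = bfs_alt table visited
instance (table : List (List String)) (visited : List (List Bool)) (out : Int) :
    Decidable (Spec_bfs table visited out) := by unfold Spec_bfs; infer_instance

-- ===== CLAIM (what is proved, stated in full; the proofs are below) =====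
def Claim_equal_bfs : Prop := ∀ (table : List (List String)) (visited : List (List Bool)), Dom_bfs table visited → Pre_bfs table visited → Spec_bfs table visited (bfs table visited)

-- ===== LEMMAS AND PROOFS =====

-- ===== LEMMAS AND PROOFS =====
-- ---- proof-side notions ----
def InV (v : List (List Bool)) (x y : Int) : Prop :=
  0 ≤ x ∧ x.toNat < v.length ∧ 0 ≤ y ∧ y.toNat < (v.getD x.toNat []).length

def InG (t : List (List String)) (x y : Int) : Prop :=
  0 ≤ x ∧ x < (t.length : Int) ∧ 0 ≤ y ∧ y < (widthT t : Int)

def InT (t : List (List String)) (x y : Int) : Prop :=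
  0 ≤ x ∧ x.toNat < t.length ∧ 0 ≤ y ∧ y.toNat < (t.getD x.toNat []).length

def Shp (t : List (List String)) (v : List (List Bool)) : Prop :=
  t.length ≤ v.length ∧ ∀ k : Nat, k < t.length →
    widthT t ≤ (t.getD k []).length ∧ (t.getD k []).length ≤ (v.getD k []).length

def countFalse (v : List (List Bool)) : Nat :=
  (v.map (fun r => r.countP (fun b => b = false))).sum

def markAll (v : List (List Bool)) (cs : List (Int × Int)) : List (List Bool) :=
  cs.foldl (fun v c => set2 v c.1 c.2) v

lemma getD_out {α : Type} (l : List α) (i : Nat) (d : α) (h : l.length ≤ i) :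
    l.getD i d = d := by
  simp [List.getD_eq_getElem?_getD, List.getElem?_eq_none h]

lemma get2_true_InV (v : List (List Bool)) (x y : Int) (h : get2 v x y = true) :
    InV v x y := by
  unfold get2 at h
  split at h
  · rename_i hg
    refine ⟨hg.1, ?_, hg.2, ?_⟩
    · by_contra hlt
      rw [getD_out v x.toNat [] (by omega)] at h
      simp [List.getD] at h
    · by_contra hlt
      rw [getD_out _ y.toNat false (by omega)] at h
      exact Bool.false_ne_true h
  · exact absurd h (by simp)

lemma length_set2 (v : List (List Bool)) (x y : Int) : (set2 v x y).length = v.length := by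
  unfold set2; split <;> simp

lemma rowlen_set2 (v : List (List Bool)) (x y : Int) (k : Nat) :
    ((set2 v x y).getD k []).length = (v.getD k []).length := by
  unfold set2
  split
  · rw [List.getD_eq_getElem?_getD, List.getD_eq_getElem?_getD, List.getElem?_modify]
    cases h : v[k]? with
    | none => simp
    | some r =>
      simp only [Option.map_eq_map, Option.map_some, Option.getD_some]
      split <;> simp
  · rfl

lemma get2_set2_self (v : List (List Bool)) (x y : Int) (h : InV v x y) :
    get2 (set2 v x y) x y = true := by
  obtain ⟨hx, hxl, hy, hyl⟩ := h
  unfold get2 set2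
  rw [if_pos ⟨hx, hy⟩, if_pos ⟨hx, hy⟩]
  simp only [List.getD_eq_getElem?_getD] at hyl ⊢
  rw [List.getElem?_modify]
  cases hv : v[x.toNat]? with
  | none => rw [List.getElem?_eq_none_iff] at hv; omega
  | some r =>
    rw [hv] at hyl
    simp only [Option.map_eq_map, Option.map_some, Option.getD_some, if_true] at hyl ⊢
    rw [List.getElem?_set_self (by simpa using hyl)]
    rfl

lemma get2_set2_ne (v : List (List Bool)) (x y x' y' : Int)
    (h : ¬(x' = x ∧ y' = y)) : get2 (set2 v x y) x' y' = get2 v x' y' := by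
  unfold get2 set2
  split
  · rename_i hxy
    split
    · rename_i hxy'
      simp only [List.getD_eq_getElem?_getD]
      rw [List.getElem?_modify]
      cases hv : v[x'.toNat]? with
      | none =>
        by_cases hx : x.toNat = x'.toNat <;> simp [hx]
      | some r =>
        by_cases hx : x.toNat = x'.toNat
        · have hxe : x' = x := by omega
          have hye : ¬ (y' = y) := fun hy => h ⟨hxe, hy⟩
          simp only [hx, Option.map_eq_map, Option.map_some, Option.getD_some, if_true]
          rw [List.getElem?_set_ne (i := y.toNat) (j := y'.toNat) (by omega)]
        · simp [hx]
    · rfl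
  · rfl

lemma get2_mono_set2 (v : List (List Bool)) (x y x' y' : Int)
    (h : get2 v x' y' = true) : get2 (set2 v x y) x' y' = true := by
  by_cases he : x' = x ∧ y' = y
  · obtain ⟨hx, hy⟩ := he; subst hx; subst hy
    exact get2_set2_self v x' y' (get2_true_InV v x' y' h)
  · rw [get2_set2_ne v x y x' y' he]; exact h

lemma InV_set2 (v : List (List Bool)) (x y a b : Int) :
    InV (set2 v x y) a b ↔ InV v a b := by
  unfold InV
  rw [length_set2, rowlen_set2]

lemma countFalse_le (v : List (List Bool)) : countFalse v ≤ (v.map List.length).sum := by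
  unfold countFalse
  exact List.sum_le_sum (fun r _ => List.countP_le_length)

lemma countFalse_set2 (v : List (List Bool)) (x y : Int) (hin : InV v x y)
    (hf : get2 v x y = false) : countFalse (set2 v x y) + 1 = countFalse v := by
  obtain ⟨hx, hxl, hy, hyl⟩ := hin
  have hrow : (v.getD x.toNat [])[y.toNat] = false := by
    have := hf
    unfold get2 at this
    rw [if_pos ⟨hx, hy⟩] at this
    rwa [List.getD_eq_getElem?_getD, List.getElem?_eq_getElem hyl, Option.getD_some] at this
  unfold set2 countFalse
  rw [if_pos ⟨hx, hy⟩]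
  rw [List.modify_eq_set, List.map_set]
  have hget : v[x.toNat]?.getD default = v.getD x.toNat [] := by
    rw [List.getD_eq_getElem?_getD]; rfl
  rw [hget]
  set r := v.getD x.toNat [] with hr
  have hxlen : x.toNat < (v.map (fun r => r.countP (fun b => b = false))).length := by
    simpa using hxl
  rw [List.sum_set]
  have hsum : (v.map (fun r => r.countP (fun b => b = false))).sum
      = ((v.map (fun r => r.countP (fun b => b = false))).take x.toNat).sum
        + (v.map (fun r => r.countP (fun b => b = false)))[x.toNat]
        + ((v.map (fun r => r.countP (fun b => b = false))).drop (x.toNat + 1)).sum := by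
    conv_lhs => rw [← List.take_append_drop x.toNat (v.map (fun r => r.countP (fun b => b = false)))]
    rw [List.sum_append]
    rw [List.drop_eq_getElem_cons hxlen]
    simp [add_assoc]
  rw [if_pos hxlen]
  have hgetr : (v.map (fun r => r.countP (fun b => b = false)))[x.toNat]
      = r.countP (fun b => b = false) := by
    simp [hr, List.getD_eq_getElem?_getD, List.getElem?_eq_getElem hxl]
  have hcnt : ((r.set y.toNat true).countP (fun b => b = false)) + 1
      = (v.map (fun r => r.countP (fun b => b = false)))[x.toNat] := by
    rw [hgetr, List.countP_set hyl]
    have h1 : r[y.toNat] = false := hrow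
    simp [h1]
    have h2 : 0 < r.countP (fun b => !b) :=
      List.countP_pos_iff.mpr ⟨r[y.toNat], List.getElem_mem hyl, by simp [h1]⟩
    omega
  rw [hsum, ← hcnt]
  omega

lemma length_markAll (v : List (List Bool)) (cs : List (Int × Int)) :
    (markAll v cs).length = v.length := by
  induction cs generalizing v with
  | nil => rfl
  | cons c cs ih =>
    have hstep : markAll v (c :: cs) = markAll (set2 v c.1 c.2) cs := rfl
    rw [hstep, ih, length_set2]

lemma rowlen_markAll (v : List (List Bool)) (cs : List (Int × Int)) (k : Nat) :
    ((markAll v cs).getD k []).length = (v.getD k []).length := by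
  induction cs generalizing v with
  | nil => rfl
  | cons c cs ih =>
    have hstep : markAll v (c :: cs) = markAll (set2 v c.1 c.2) cs := rfl
    rw [hstep, ih, rowlen_set2]

lemma get2_markAll (v : List (List Bool)) (cs : List (Int × Int))
    (hin : ∀ c ∈ cs, InV v c.1 c.2) (x y : Int) :
    get2 (markAll v cs) x y = true ↔ (get2 v x y = true ∨ (x, y) ∈ cs) := by
  induction cs generalizing v with
  | nil => simp [markAll]
  | cons c cs ih =>
    have hstep : markAll v (c :: cs) = markAll (set2 v c.1 c.2) cs := rfl
    rw [hstep, ih (set2 v c.1 c.2)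
      (fun c' hc' => (InV_set2 v c.1 c.2 c'.1 c'.2).mpr (hin c' (List.mem_cons_of_mem c hc')))]
    constructor
    · rintro (hg | hm)
      · by_cases he : x = c.1 ∧ y = c.2
        · exact Or.inr (by rw [List.mem_cons]; exact Or.inl (Prod.ext he.1 he.2))
        · rw [get2_set2_ne v c.1 c.2 x y he] at hg
          exact Or.inl hg
      · exact Or.inr (List.mem_cons_of_mem c hm)
    · rintro (hg | hm)
      · exact Or.inl (get2_mono_set2 v c.1 c.2 x y hg)
      · rcases List.mem_cons.mp hm with he | hm'
        · have h1 : c.1 = x := by rw [← he]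
          have h2 : c.2 = y := by rw [← he]
          have hc : InV v x y := by
            have := hin c (by simp : c ∈ c :: cs)
            rwa [h1, h2] at this
          rw [h1, h2]
          exact Or.inl (get2_set2_self v x y hc)
        · exact Or.inr hm'

lemma countFalse_markAll (v : List (List Bool)) (cs : List (Int × Int))
    (hno : cs.Nodup) (hin : ∀ c ∈ cs, InV v c.1 c.2)
    (hf : ∀ c ∈ cs, get2 v c.1 c.2 = false) :
    countFalse (markAll v cs) + cs.length = countFalse v := by
  induction cs generalizing v with
  | nil => simp [markAll]
  | cons c cs ih =>
    have hstep : markAll v (c :: cs) = markAll (set2 v c.1 c.2) cs := rfl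
    rw [hstep]
    have hinv : InV v c.1 c.2 := hin c (by simp : c ∈ c :: cs)
    have hfc : get2 v c.1 c.2 = false := hf c (by simp : c ∈ c :: cs)
    have hrec := ih (set2 v c.1 c.2) (List.Nodup.of_cons hno)
      (fun c' hc' => (InV_set2 v c.1 c.2 c'.1 c'.2).mpr (hin c' (List.mem_cons_of_mem c hc')))
      (fun c' hc' => by
        have hne : ¬(c'.1 = c.1 ∧ c'.2 = c.2) := by
          intro hcc
          have : c' = c := Prod.ext hcc.1 hcc.2
          rw [this] at hc'
          exact (List.nodup_cons.mp hno).1 hc'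
        rw [get2_set2_ne v c.1 c.2 c'.1 c'.2 hne]
        exact hf c' (List.mem_cons_of_mem c hc'))
    have := countFalse_set2 v c.1 c.2 hinv hfc
    simp only [List.length_cons]
    omega

-- ---- the consecutive-letter graph and reachability through unvisited cells ----
def Edge (t : List (List String)) (p c : Int × Int) : Prop :=
  ∃ d ∈ pyDirs, c = (d.1 + p.1, d.2 + p.2) ∧ InG t c.1 c.2 ∧
    cellAt t c.1 c.2 = succStr (cellAt t p.1 p.2)

inductive RV (t : List (List String)) (v : List (List Bool)) :
    (Int × Int) → (Int × Int) → Prop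
  | refl (a : Int × Int) : RV t v a a
  | step {a b c : Int × Int} : RV t v a b → Edge t b c → get2 v c.1 c.2 = false → RV t v a c

def RF (t : List (List String)) (v : List (List Bool)) (P : List (Int × Int))
    (c : Int × Int) : Prop := ∃ p ∈ P, RV t v p c

def valT (t : List (List String)) (c : Int × Int) : Int := pyOrd (cellAt t c.1 c.2) - 64

def OkT (t : List (List String)) : Prop :=
  ∀ x y : Int, (pyOrd (cellAt t x y)).toNat + 1 < 55296

lemma rv_trans (t : List (List String)) (v : List (List Bool)) {a b c : Int × Int}
    (h1 : RV t v a b) (h2 : RV t v b c) : RV t v a c := by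
  induction h2 with
  | refl => exact h1
  | step _ he hf ih => exact RV.step ih he hf

lemma rv_mono (t : List (List String)) (v v' : List (List Bool))
    (hm : ∀ x y : Int, get2 v x y = true → get2 v' x y = true) {a c : Int × Int}
    (h : RV t v' a c) : RV t v a c := by
  induction h with
  | refl => exact RV.refl _
  | step _ he hf ih =>
    refine RV.step ih he ?_
    cases hg : get2 v _ _
    · rfl
    · rw [hm _ _ hg] at hf; exact hf.symm ▸ rfl

lemma rv_end (t : List (List String)) (v : List (List Bool)) {p c : Int × Int}
    (h : RV t v p c) : c = p ∨ get2 v c.1 c.2 = false := by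
  cases h with
  | refl => exact Or.inl rfl
  | step _ _ hf => exact Or.inr hf

-- ---- the batch successor list of a popped cell ----
def succsL (t : List (List String)) (v : List (List Bool)) (x y : Int)
    (L : List (Int × Int)) : List (Int × Int) :=
  L.filterMap (fun d =>
    if 0 ≤ d.1 + x ∧ d.1 + x < (t.length : Int) ∧ 0 ≤ d.2 + y ∧ d.2 + y < (widthT t : Int) ∧
        cellAt t (d.1 + x) (d.2 + y) = succStr (cellAt t x y) ∧
        get2 v (d.1 + x) (d.2 + y) = false
    then some (d.1 + x, d.2 + y) else none)

lemma succsL_congr (t : List (List String)) (v v' : List (List Bool)) (x y : Int)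
    (L : List (Int × Int))
    (h : ∀ d ∈ L, get2 v' (d.1 + x) (d.2 + y) = get2 v (d.1 + x) (d.2 + y)) :
    succsL t v' x y L = succsL t v x y L := by
  unfold succsL
  exact List.filterMap_congr (fun d hd => by rw [h d hd])

lemma mem_succs (t : List (List String)) (v : List (List Bool)) (x y : Int)
    (c : Int × Int) :
    c ∈ succsL t v x y pyDirs ↔ Edge t (x, y) c ∧ get2 v c.1 c.2 = false := by
  unfold succsL Edge InG
  rw [List.mem_filterMap]
  constructor
  · rintro ⟨d, hd, hsome⟩
    split at hsome
    · rename_i hc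
      cases hsome
      exact ⟨⟨d, hd, rfl, ⟨hc.1, hc.2.1, hc.2.2.1, hc.2.2.2.1⟩, hc.2.2.2.2.1⟩, hc.2.2.2.2.2⟩
    · exact absurd hsome (by simp)
  · rintro ⟨⟨d, hd, hc, hg, hcell⟩, hunvis⟩
    refine ⟨d, hd, ?_⟩
    subst hc
    rw [if_pos ⟨hg.1, hg.2.1, hg.2.2.1, hg.2.2.2, hcell, hunvis⟩]

lemma nodup_succs (t : List (List String)) (v : List (List Bool)) (x y : Int) :
    (succsL t v x y pyDirs).Nodup := by
  apply List.Nodup.filterMap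
  · intro d d' c hc hc'
    split at hc
    · injection hc with h1
      split at hc'
      · injection hc' with h2
        rw [← h2] at h1
        have e1 : d.1 + x = d'.1 + x := congrArg Prod.fst h1
        have e2 : d.2 + y = d'.2 + y := congrArg Prod.snd h1
        exact Prod.ext (by omega) (by omega)
      · exact absurd hc' (by simp)
    · exact absurd hc (by simp)
  · decide

-- ---- the inner direction loops compute the batch successors ----
lemma foldA_char (t : List (List String)) (x y steps : Int) :
    ∀ (L : List (Int × Int)), L.Pairwise (· ≠ ·) →
    ∀ (acc : List ((Int × Int) × Int)) (v : List (List Bool)) (b : Int),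
    L.foldl (bfsInnerA t x y steps) (acc, v, b) =
      (acc ++ (succsL t v x y L).map (fun c => (c, steps + 1)),
       markAll v (succsL t v x y L),
       if succsL t v x y L = [] then b else max b (steps + 1)) := by
  intro L
  induction L with
  | nil => intro _ acc v b; simp [succsL, markAll]
  | cons d L ih =>
    intro hpw acc v b
    have hpw' := (List.pairwise_cons.mp hpw).2
    have hdne := (List.pairwise_cons.mp hpw).1
    rw [List.foldl_cons]
    by_cases hc : 0 ≤ d.1 + x ∧ d.1 + x < (t.length : Int) ∧ 0 ≤ d.2 + y ∧
        d.2 + y < (widthT t : Int) ∧ cellAt t (d.1 + x) (d.2 + y) = succStr (cellAt t x y)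
    · by_cases hu : get2 v (d.1 + x) (d.2 + y) = false
      · have hhead : bfsInnerA t x y steps (acc, v, b) d
            = (acc ++ [((d.1 + x, d.2 + y), steps + 1)], set2 v (d.1 + x) (d.2 + y),
               max b (steps + 1)) := by
          simp only [bfsInnerA]
          rw [if_pos hc, if_pos hu]
        rw [hhead]
        have hS : succsL t v x y (d :: L)
            = (d.1 + x, d.2 + y) :: succsL t v x y L := by
          unfold succsL
          rw [List.filterMap_cons]
          rw [if_pos ⟨hc.1, hc.2.1, hc.2.2.1, hc.2.2.2.1, hc.2.2.2.2, hu⟩]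
        have hcongr : succsL t (set2 v (d.1 + x) (d.2 + y)) x y L = succsL t v x y L := by
          apply succsL_congr
          intro d' hd'
          apply get2_set2_ne
          intro hdd
          exact (hdne d' hd') (Prod.ext (by omega) (by omega))
        rw [ih hpw' (acc ++ [((d.1 + x, d.2 + y), steps + 1)]) (set2 v (d.1 + x) (d.2 + y)) (max b (steps + 1))]
        rw [hcongr, hS]
        refine congrArg₂ _ ?_ (congrArg₂ _ rfl ?_)
        · simp
        · by_cases hS0 : succsL t v x y L = []
          · simp [hS0]
          · rw [if_neg hS0, if_neg (List.cons_ne_nil _ _), max_assoc, max_self]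
      · have hhead : bfsInnerA t x y steps (acc, v, b) d = (acc, v, b) := by
          simp only [bfsInnerA]
          rw [if_pos hc, if_neg hu]
        rw [hhead]
        have hS : succsL t v x y (d :: L) = succsL t v x y L := by
          unfold succsL
          rw [List.filterMap_cons]
          have : ¬(0 ≤ d.1 + x ∧ d.1 + x < (t.length : Int) ∧ 0 ≤ d.2 + y ∧
              d.2 + y < (widthT t : Int) ∧ cellAt t (d.1 + x) (d.2 + y) = succStr (cellAt t x y) ∧
              get2 v (d.1 + x) (d.2 + y) = false) := fun h => hu h.2.2.2.2.2
          rw [if_neg this]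
        rw [ih hpw' acc v b, hS]
    · have hhead : bfsInnerA t x y steps (acc, v, b) d = (acc, v, b) := by
        simp only [bfsInnerA]
        rw [if_neg hc]
      rw [hhead]
      have hS : succsL t v x y (d :: L) = succsL t v x y L := by
        unfold succsL
        rw [List.filterMap_cons]
        have : ¬(0 ≤ d.1 + x ∧ d.1 + x < (t.length : Int) ∧ 0 ≤ d.2 + y ∧
            d.2 + y < (widthT t : Int) ∧ cellAt t (d.1 + x) (d.2 + y) = succStr (cellAt t x y) ∧
            get2 v (d.1 + x) (d.2 + y) = false) := fun h =>
          hc ⟨h.1, h.2.1, h.2.2.1, h.2.2.2.1, h.2.2.2.2.1⟩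
        rw [if_neg this]
      rw [ih hpw' acc v b, hS]

lemma foldB_char (t : List (List String)) (x y : Int) :
    ∀ (L : List (Int × Int)), L.Pairwise (· ≠ ·) →
    ∀ (acc : List (Int × Int)) (v : List (List Bool)),
    L.foldl (bfsInnerB t x y) (acc, v) =
      (acc ++ succsL t v x y L, markAll v (succsL t v x y L)) := by
  intro L
  induction L with
  | nil => intro _ acc v; simp [succsL, markAll]
  | cons d L ih =>
    intro hpw acc v
    have hpw' := (List.pairwise_cons.mp hpw).2
    have hdne := (List.pairwise_cons.mp hpw).1
    rw [List.foldl_cons]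
    by_cases hc : 0 ≤ d.1 + x ∧ d.1 + x < (t.length : Int) ∧ 0 ≤ d.2 + y ∧
        d.2 + y < (widthT t : Int) ∧ cellAt t (d.1 + x) (d.2 + y) = succStr (cellAt t x y) ∧
        get2 v (d.1 + x) (d.2 + y) = false
    · have hhead : bfsInnerB t x y (acc, v) d
          = (acc ++ [(d.1 + x, d.2 + y)], set2 v (d.1 + x) (d.2 + y)) := by
        simp only [bfsInnerB]
        rw [if_pos hc]
      rw [hhead]
      have hS : succsL t v x y (d :: L) = (d.1 + x, d.2 + y) :: succsL t v x y L := by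
        unfold succsL
        rw [List.filterMap_cons, if_pos hc]
      have hcongr : succsL t (set2 v (d.1 + x) (d.2 + y)) x y L = succsL t v x y L := by
        apply succsL_congr
        intro d' hd'
        apply get2_set2_ne
        intro hdd
        exact (hdne d' hd') (Prod.ext (by omega) (by omega))
      rw [ih hpw' (acc ++ [(d.1 + x, d.2 + y)]) (set2 v (d.1 + x) (d.2 + y))]
      rw [hcongr, hS]
      refine congrArg₂ _ ?_ rfl
      simp
    · have hhead : bfsInnerB t x y (acc, v) d = (acc, v) := by
        simp only [bfsInnerB]
        rw [if_neg hc]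
      rw [hhead]
      have hS : succsL t v x y (d :: L) = succsL t v x y L := by
        unfold succsL
        rw [List.filterMap_cons, if_neg hc]
      rw [ih hpw' acc v, hS]

lemma pyOrd_nonneg (s : String) : 0 ≤ pyOrd s := by
  unfold pyOrd; positivity

lemma char_ofNat_toNat (n : Nat) (h : n < 55296) : (Char.ofNat n).toNat = n := by
  have hv : n.isValidChar := Or.inl h
  simp [Char.ofNat, hv]

lemma pyOrd_succStr (s : String) (h : (pyOrd s).toNat + 1 < 55296) :
    pyOrd (succStr s) = pyOrd s + 1 := by
  have h1 : (succStr s).toList = [Char.ofNat ((pyOrd s).toNat + 1)] := by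
    unfold succStr; exact String.toList_ofList
  have h0 := pyOrd_nonneg s
  conv_lhs => unfold pyOrd
  rw [h1]
  simp only [List.headD_cons]
  rw [char_ofNat_toNat _ h]
  push_cast
  omega

lemma dom_okT (t : List (List String)) (v : List (List Bool))
    (hDom : Dom_bfs t v) : OkT t := by
  intro x y
  have hcell : cellAt t x y = "" ∨ ∃ r ∈ t, cellAt t x y ∈ r := by
    unfold cellAt
    split
    · by_cases hx : x.toNat < t.length
      · by_cases hy : y.toNat < (t.getD x.toNat []).length
        · right
          refine ⟨t.getD x.toNat [], ?_, ?_⟩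
          · rw [List.getD_eq_getElem?_getD, List.getElem?_eq_getElem hx, Option.getD_some]
            exact List.getElem_mem hx
          · rw [List.getD_eq_getElem?_getD (l := t.getD x.toNat []),
              List.getElem?_eq_getElem hy, Option.getD_some]
            exact List.getElem_mem hy
        · left
          rw [getD_out _ y.toNat "" (by omega)]
      · left
        rw [getD_out t x.toNat [] (by omega)]
        rfl
    · left; rfl
  have hord : (pyOrd (cellAt t x y)).toNat ≤ 126 := by
    rcases hcell with he | ⟨r, hr, hs⟩
    · rw [he]; decide
    · unfold Dom_bfs at hDom
      rw [List.all_eq_true] at hDom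
      have hrow := hDom r hr
      rw [List.all_eq_true] at hrow
      have hstr := hrow _ hs
      unfold pvDomStr at hstr
      rw [List.all_eq_true] at hstr
      unfold pyOrd
      cases hl : (cellAt t x y).toList with
      | nil => simp
      | cons c cs =>
        have hc := hstr c (by rw [hl]; exact List.mem_cons_self)
        simp only [List.headD_cons, Int.toNat_natCast]
        simp [pvDomChar] at hc
        omega
  omega

lemma InG_InT (t : List (List String)) (v : List (List Bool)) (hShp : Shp t v)
    (x y : Int) (h : InG t x y) : InT t x y := by
  obtain ⟨hx0, hx1, hy0, hy1⟩ := h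
  have hx : x.toNat < t.length := by omega
  have hw := (hShp.2 x.toNat hx).1
  exact ⟨hx0, hx, hy0, by omega⟩

lemma InT_InV (t : List (List String)) (v : List (List Bool)) (hShp : Shp t v)
    (x y : Int) (h : InT t x y) : InV v x y := by
  obtain ⟨hx0, hx1, hy0, hy1⟩ := h
  have h1 := hShp.1
  have h2 := (hShp.2 x.toNat hx1).2
  exact ⟨hx0, by omega, hy0, by omega⟩

lemma done_step (t : List (List String)) (v : List (List Bool)) (p : Int × Int)
    (pend rest : List (Int × Int)) (hShp : Shp t v)
    (hp : ∀ c : Int × Int, c ∈ pend ↔ c = p ∨ c ∈ rest)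
    (hmk : ∀ c ∈ pend, get2 v c.1 c.2 = true) :
    ∀ c : Int × Int,
      (get2 v c.1 c.2 = true ∨ RF t v pend c) ↔
      (get2 (markAll v (succsL t v p.1 p.2 pyDirs)) c.1 c.2 = true
       ∨ RF t (markAll v (succsL t v p.1 p.2 pyDirs)) (rest ++ succsL t v p.1 p.2 pyDirs) c) := by
  intro c
  set S := succsL t v p.1 p.2 pyDirs with hSdef
  have hSin : ∀ c' ∈ S, InV v c'.1 c'.2 := by
    intro c' hc'
    have hE := ((mem_succs t v p.1 p.2 c').mp (by rwa [← hSdef])).1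
    obtain ⟨d, _, _, hg, _⟩ := hE
    exact InT_InV t v hShp _ _ (InG_InT t v hShp _ _ hg)
  have hv' : ∀ z : Int × Int,
      get2 (markAll v S) z.1 z.2 = true ↔ (get2 v z.1 z.2 = true ∨ z ∈ S) := by
    intro z
    simpa using get2_markAll v S hSin z.1 z.2
  have hmono : ∀ a b : Int, get2 v a b = true → get2 (markAll v S) a b = true := by
    intro a b h
    exact (hv' (a, b)).mpr (Or.inl h)
  constructor
  · rintro (hg | ⟨q, hq, rv⟩)
    · exact Or.inl (hmono _ _ hg)
    · have aux : ∀ c' : Int × Int, RV t v q c' →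
          (get2 (markAll v S) c'.1 c'.2 = true ∨ RF t (markAll v S) (rest ++ S) c') := by
        intro c' rv'
        induction rv' with
        | refl => exact Or.inl (hmono _ _ (hmk q hq))
        | @step bb cc h1 he hf ih =>
          by_cases hcv : get2 (markAll v S) cc.1 cc.2 = true
          · exact Or.inl hcv
          · have hcf : get2 (markAll v S) cc.1 cc.2 = false := by
              revert hcv; cases get2 (markAll v S) cc.1 cc.2 <;> simp
            have hcS : cc ∉ S := fun hmem => hcv ((hv' cc).mpr (Or.inr hmem))
            rcases ih with hb | hb
            · rcases (hv' bb).mp hb with hbv | hbS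
              · rcases rv_end t v h1 with hbq | hbf
                · rcases (hp q).mp hq with hqp | hqr
                  · exfalso
                    apply hcS
                    rw [hSdef, mem_succs]
                    refine ⟨?_, hf⟩
                    have : bb = (p.1, p.2) := by rw [hbq, hqp]
                    rwa [this] at he
                  · exact Or.inr ⟨q, List.mem_append_left _ hqr,
                      RV.step (RV.refl q) (hbq ▸ he) hcf⟩
                · exact absurd hbv (by simp [hbf])
              · exact Or.inr ⟨bb, List.mem_append_right _ hbS,
                  RV.step (RV.refl bb) he hcf⟩
            · obtain ⟨q2, hq2, rv2⟩ := hb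
              exact Or.inr ⟨q2, hq2, RV.step rv2 he hcf⟩
      exact aux c rv
  · rintro (hg | ⟨q, hq, rv⟩)
    · rcases (hv' c).mp hg with hgv | hcS
      · exact Or.inl hgv
      · right
        have hm := (mem_succs t v p.1 p.2 c).mp (by rwa [← hSdef])
        exact ⟨p, (hp p).mpr (Or.inl rfl), RV.step (RV.refl p) hm.1 hm.2⟩
    · have rvv : RV t v q c := rv_mono t v (markAll v S) hmono rv
      rcases List.mem_append.mp hq with hqr | hqS
      · exact Or.inr ⟨q, (hp q).mpr (Or.inr hqr), rvv⟩
      · have hm := (mem_succs t v p.1 p.2 q).mp (by rwa [← hSdef])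
        exact Or.inr ⟨p, (hp p).mpr (Or.inl rfl),
          rv_trans t v (RV.step (RV.refl p) hm.1 hm.2) rvv⟩

lemma val_edge (t : List (List String)) (hOk : OkT t) {p c : Int × Int}
    (hE : Edge t p c) : valT t c = valT t p + 1 := by
  obtain ⟨d, _, _, _, hcell⟩ := hE
  unfold valT
  rw [hcell, pyOrd_succStr _ (hOk p.1 p.2)]
  ring

lemma shp_markAll (t : List (List String)) (v : List (List Bool))
    (cs : List (Int × Int)) (hShp : Shp t v) : Shp t (markAll v cs) := by
  constructor
  · rw [length_markAll]; exact hShp.1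
  · intro k hk; rw [rowlen_markAll]; exact hShp.2 k hk

theorem loopA_spec (t : List (List String)) (hOk : OkT t) :
    ∀ (fuel : Nat) (pend : List ((Int × Int) × Int)) (v : List (List Bool)) (b : Int),
    Shp t v →
    (∀ e ∈ pend, InT t e.1.1 e.1.2 ∧ get2 v e.1.1 e.1.2 = true ∧ e.2 = valT t e.1) →
    countFalse v + pend.length ≤ fuel →
    ((bfsLoopA t fuel pend v b).1.length = v.length ∧
     (∀ k : Nat, ((bfsLoopA t fuel pend v b).1.getD k []).length = (v.getD k []).length)) ∧
    (∀ c : Int × Int, get2 (bfsLoopA t fuel pend v b).1 c.1 c.2 = true ↔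
        (get2 v c.1 c.2 = true ∨ RF t v (pend.map Prod.fst) c)) ∧
    b ≤ (bfsLoopA t fuel pend v b).2 ∧
    (∀ c : Int × Int, RF t v (pend.map Prod.fst) c → get2 v c.1 c.2 = false →
        valT t c ≤ (bfsLoopA t fuel pend v b).2) ∧
    ((bfsLoopA t fuel pend v b).2 = b ∨
     ∃ c : Int × Int, RF t v (pend.map Prod.fst) c ∧ get2 v c.1 c.2 = false ∧
        (bfsLoopA t fuel pend v b).2 = valT t c) := by
  intro fuel
  induction fuel with
  | zero =>
    intro pend v b hShp hpend hfuel
    have hpnil : pend = [] := by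
      cases pend with
      | nil => rfl
      | cons e es => simp at hfuel
    subst hpnil
    exact ⟨⟨rfl, fun k => rfl⟩, fun c => by simp [bfsLoopA, RF], le_refl b,
      fun c hc => absurd hc (by simp [RF]), Or.inl rfl⟩
  | succ fuel ih =>
    intro pend v b hShp hpend hfuel
    cases pend with
    | nil =>
      exact ⟨⟨rfl, fun k => rfl⟩, fun c => by simp [bfsLoopA, RF], le_refl b,
        fun c hc => absurd hc (by simp [RF]), Or.inl rfl⟩
    | cons e rest =>
      obtain ⟨⟨x, y⟩, steps⟩ := e
      obtain ⟨hInT, hmarked, hsteps0⟩ := hpend ((x, y), steps) (by simp)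
      have hsteps : steps = valT t (x, y) := hsteps0
      have hstep : bfsLoopA t (fuel + 1) (((x, y), steps) :: rest) v b
          = bfsLoopA t fuel (rest ++ (succsL t v x y pyDirs).map (fun c => (c, steps + 1)))
              (markAll v (succsL t v x y pyDirs))
              (if succsL t v x y pyDirs = [] then b else max b (steps + 1)) := by
        simp only [bfsLoopA]
        rw [foldA_char t x y steps pyDirs (by decide) rest v b]
      have hSfacts : ∀ c ∈ succsL t v x y pyDirs,
          Edge t (x, y) c ∧ get2 v c.1 c.2 = false :=
        fun c hc => (mem_succs t v x y c).mp hc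
      have hSInT : ∀ c ∈ succsL t v x y pyDirs, InT t c.1 c.2 := by
        intro c hc
        obtain ⟨d, _, _, hg, _⟩ := (hSfacts c hc).1
        exact InG_InT t v hShp _ _ hg
      have hSInV : ∀ c ∈ succsL t v x y pyDirs, InV v c.1 c.2 :=
        fun c hc => InT_InV t v hShp _ _ (hSInT c hc)
      have hv'char : ∀ z : Int × Int,
          get2 (markAll v (succsL t v x y pyDirs)) z.1 z.2 = true ↔
          (get2 v z.1 z.2 = true ∨ z ∈ succsL t v x y pyDirs) := by
        intro z
        simpa using get2_markAll v (succsL t v x y pyDirs) hSInV z.1 z.2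
      have hshape' : Shp t (markAll v (succsL t v x y pyDirs)) := shp_markAll t v _ hShp
      have hpend' : ∀ e ∈ rest ++ (succsL t v x y pyDirs).map (fun c => (c, steps + 1)),
          InT t e.1.1 e.1.2 ∧ get2 (markAll v (succsL t v x y pyDirs)) e.1.1 e.1.2 = true
          ∧ e.2 = valT t e.1 := by
        intro e he
        rcases List.mem_append.mp he with hr | hs
        · obtain ⟨h1, h2, h3⟩ := hpend e (by simp [hr])
          exact ⟨h1, (hv'char e.1).mpr (Or.inl h2), h3⟩
        · obtain ⟨c, hc, rfl⟩ := List.mem_map.mp hs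
          refine ⟨hSInT c hc, (hv'char c).mpr (Or.inr hc), ?_⟩
          have hv := val_edge t hOk (hSfacts c hc).1
          simp only []
          rw [hv, ← hsteps]
      have hcnt : countFalse (markAll v (succsL t v x y pyDirs))
          + (succsL t v x y pyDirs).length = countFalse v :=
        countFalse_markAll v _ (nodup_succs t v x y) hSInV (fun c hc => (hSfacts c hc).2)
      have hfuel' : countFalse (markAll v (succsL t v x y pyDirs))
          + (rest ++ (succsL t v x y pyDirs).map (fun c => (c, steps + 1))).length ≤ fuel := by
        simp only [List.length_append, List.length_map]
        simp only [List.length_cons] at hfuel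
        omega
      have IH := ih (rest ++ (succsL t v x y pyDirs).map (fun c => (c, steps + 1)))
        (markAll v (succsL t v x y pyDirs))
        (if succsL t v x y pyDirs = [] then b else max b (steps + 1)) hshape' hpend' hfuel'
      obtain ⟨⟨hlen', hrow'⟩, hiff', hble', hbound', hach'⟩ := IH
      have hmapfst : (rest ++ (succsL t v x y pyDirs).map (fun c => (c, steps + 1))).map Prod.fst
          = rest.map Prod.fst ++ succsL t v x y pyDirs := by
        simp [Function.comp_def]
      rw [hmapfst] at hiff' hbound' hach'
      have hp : ∀ c : Int × Int, c ∈ ((((x, y), steps) :: rest).map Prod.fst) ↔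
          c = (x, y) ∨ c ∈ rest.map Prod.fst := by simp
      have hmk : ∀ c ∈ (((x, y), steps) :: rest).map Prod.fst, get2 v c.1 c.2 = true := by
        intro c hc
        obtain ⟨e, he, rfl⟩ := List.mem_map.mp hc
        exact (hpend e he).2.1
      have hD1 := done_step t v (x, y) ((((x, y), steps) :: rest).map Prod.fst)
        (rest.map Prod.fst) hShp hp hmk
      rw [hstep]
      have hb1 : b ≤ (if succsL t v x y pyDirs = [] then b else max b (steps + 1)) := by
        split
        · exact le_refl b
        · exact le_max_left _ _
      refine ⟨⟨?_, ?_⟩, ?_, le_trans hb1 hble', ?_, ?_⟩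
      · rw [hlen', length_markAll]
      · intro k; rw [hrow' k, rowlen_markAll]
      · intro c
        exact Iff.trans (hiff' c) (hD1 c).symm
      · intro c hRF hun
        by_cases hv'c : get2 (markAll v (succsL t v x y pyDirs)) c.1 c.2 = true
        · rcases (hv'char c).mp hv'c with hvv | hcS
          · exact absurd hvv (by simp [hun])
          · have hvc : valT t c = steps + 1 := by
              rw [val_edge t hOk (hSfacts c hcS).1, ← hsteps]
            have hS0 : succsL t v x y pyDirs ≠ [] := List.ne_nil_of_mem hcS
            have : steps + 1 ≤ (if succsL t v x y pyDirs = [] then b else max b (steps + 1)) := by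
              rw [if_neg hS0]; exact le_max_right _ _
            rw [hvc]
            exact le_trans this hble'
        · have hcf : get2 (markAll v (succsL t v x y pyDirs)) c.1 c.2 = false := by
            revert hv'c; cases get2 (markAll v (succsL t v x y pyDirs)) c.1 c.2 <;> simp
          have hRF' : RF t (markAll v (succsL t v x y pyDirs))
              (rest.map Prod.fst ++ succsL t v x y pyDirs) c := by
            rcases (hD1 c).mp (Or.inr hRF) with hg | hrf
            · exact absurd hg hv'c
            · exact hrf
          exact hbound' c hRF' hcf
      · rcases hach' with hb1e | ⟨c, hcRF, hcun, hval⟩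
        · by_cases hS0 : succsL t v x y pyDirs = []
          · left; rw [hb1e, if_pos hS0]
          · rcases max_choice b (steps + 1) with hmb | hms
            · left; rw [hb1e, if_neg hS0, hmb]
            · right
              obtain ⟨c0, hc0⟩ := List.exists_mem_of_ne_nil _ hS0
              refine ⟨c0, ⟨(x, y), by simp, RV.step (RV.refl _) (hSfacts c0 hc0).1
                (hSfacts c0 hc0).2⟩, (hSfacts c0 hc0).2, ?_⟩
              rw [hb1e, if_neg hS0, hms, val_edge t hOk (hSfacts c0 hc0).1, ← hsteps]
        · right
          have hcv : get2 v c.1 c.2 = false := by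
            cases hg : get2 v c.1 c.2
            · rfl
            · exact absurd ((hv'char c).mpr (Or.inl hg)) (by simp [hcun])
          have hcRF2 : RF t v ((((x, y), steps) :: rest).map Prod.fst) c := by
            rcases (hD1 c).mpr (Or.inr hcRF) with hg | hrf
            · exact absurd hg (by simp [hcv])
            · exact hrf
          exact ⟨c, hcRF2, hcv, hval⟩

theorem loopB_spec (t : List (List String)) (hOk : OkT t) :
    ∀ (fuel : Nat) (pend : List (Int × Int)) (v : List (List Bool)) (b : Int),
    Shp t v →
    (∀ c ∈ pend, InT t c.1 c.2 ∧ get2 v c.1 c.2 = true) →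
    countFalse v + pend.length ≤ fuel →
    ((bfsLoopB t fuel pend v b).1.length = v.length ∧
     (∀ k : Nat, ((bfsLoopB t fuel pend v b).1.getD k []).length = (v.getD k []).length)) ∧
    (∀ c : Int × Int, get2 (bfsLoopB t fuel pend v b).1 c.1 c.2 = true ↔
        (get2 v c.1 c.2 = true ∨ RF t v pend c)) ∧
    b ≤ (bfsLoopB t fuel pend v b).2 ∧
    (∀ c : Int × Int, RF t v pend c → valT t c ≤ (bfsLoopB t fuel pend v b).2) ∧
    ((bfsLoopB t fuel pend v b).2 = b ∨
     ∃ c : Int × Int, RF t v pend c ∧ (bfsLoopB t fuel pend v b).2 = valT t c) := by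
  intro fuel
  induction fuel with
  | zero =>
    intro pend v b hShp hpend hfuel
    have hpnil : pend = [] := by
      cases pend with
      | nil => rfl
      | cons e es => simp at hfuel
    subst hpnil
    exact ⟨⟨rfl, fun k => rfl⟩, fun c => by simp [bfsLoopB, RF], le_refl b,
      fun c hc => absurd hc (by simp [RF]), Or.inl rfl⟩
  | succ fuel ih =>
    intro pend v b hShp hpend hfuel
    cases pend with
    | nil =>
      exact ⟨⟨rfl, fun k => rfl⟩, fun c => by simp [bfsLoopB, RF], le_refl b,
        fun c hc => absurd hc (by simp [RF]), Or.inl rfl⟩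
    | cons c0 cs =>
      have hsplit : (c0 :: cs).dropLast ++ [(c0 :: cs).getLast (List.cons_ne_nil c0 cs)]
          = c0 :: cs := List.dropLast_append_getLast _
      have hpmem : (c0 :: cs).getLast (List.cons_ne_nil c0 cs) ∈ c0 :: cs :=
        List.getLast_mem _
      obtain ⟨hInTp, hmarkp⟩ := hpend _ hpmem
      have hstep : bfsLoopB t (fuel + 1) (c0 :: cs) v b
          = bfsLoopB t fuel
              ((c0 :: cs).dropLast ++ succsL t v ((c0 :: cs).getLast (List.cons_ne_nil c0 cs)).1
                ((c0 :: cs).getLast (List.cons_ne_nil c0 cs)).2 pyDirs)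
              (markAll v (succsL t v ((c0 :: cs).getLast (List.cons_ne_nil c0 cs)).1
                ((c0 :: cs).getLast (List.cons_ne_nil c0 cs)).2 pyDirs))
              (max b (valT t ((c0 :: cs).getLast (List.cons_ne_nil c0 cs)))) := by
        simp only [bfsLoopB]
        rw [foldB_char t _ _ pyDirs (by decide) ((c0 :: cs).dropLast) v]
        rfl
      set p := (c0 :: cs).getLast (List.cons_ne_nil c0 cs) with hpdef
      set rest := (c0 :: cs).dropLast with hrdef
      set S := succsL t v p.1 p.2 pyDirs with hSdef
      have hSfacts : ∀ c ∈ S, Edge t (p.1, p.2) c ∧ get2 v c.1 c.2 = false :=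
        fun c hc => (mem_succs t v p.1 p.2 c).mp hc
      have hSInT : ∀ c ∈ S, InT t c.1 c.2 := by
        intro c hc
        obtain ⟨d, _, _, hg, _⟩ := (hSfacts c hc).1
        exact InG_InT t v hShp _ _ hg
      have hSInV : ∀ c ∈ S, InV v c.1 c.2 :=
        fun c hc => InT_InV t v hShp _ _ (hSInT c hc)
      have hv'char : ∀ z : Int × Int,
          get2 (markAll v S) z.1 z.2 = true ↔ (get2 v z.1 z.2 = true ∨ z ∈ S) := by
        intro z
        simpa using get2_markAll v S hSInV z.1 z.2
      have hmono : ∀ a b2 : Int, get2 v a b2 = true → get2 (markAll v S) a b2 = true :=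
        fun a b2 h => (hv'char (a, b2)).mpr (Or.inl h)
      have hshape' : Shp t (markAll v S) := shp_markAll t v _ hShp
      have hpend' : ∀ c ∈ rest ++ S,
          InT t c.1 c.2 ∧ get2 (markAll v S) c.1 c.2 = true := by
        intro c hc
        rcases List.mem_append.mp hc with hr | hs
        · obtain ⟨h1, h2⟩ := hpend c (List.dropLast_subset _ hr)
          exact ⟨h1, hmono _ _ h2⟩
        · exact ⟨hSInT c hs, (hv'char c).mpr (Or.inr hs)⟩
      have hcnt : countFalse (markAll v S) + S.length = countFalse v :=
        countFalse_markAll v _ (nodup_succs t v p.1 p.2) hSInV (fun c hc => (hSfacts c hc).2)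
      have hlrest : rest.length = cs.length := by
        rw [hrdef, List.length_dropLast, List.length_cons]
        omega
      have hfuel' : countFalse (markAll v S) + (rest ++ S).length ≤ fuel := by
        simp only [List.length_append, hlrest]
        simp only [List.length_cons] at hfuel
        omega
      have IH := ih (rest ++ S) (markAll v S) (max b (valT t p)) hshape' hpend' hfuel'
      obtain ⟨⟨hlen', hrow'⟩, hiff', hble', hbound', hach'⟩ := IH
      have hp : ∀ c : Int × Int, c ∈ c0 :: cs ↔ c = p ∨ c ∈ rest := by
        intro c
        constructor
        · intro hc
          rw [← hsplit] at hc
          rcases List.mem_append.mp hc with h1 | h2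
          · exact Or.inr h1
          · exact Or.inl (List.mem_singleton.mp h2)
        · rintro (h1 | h2)
          · rw [h1]; exact hpmem
          · rw [← hsplit]; exact List.mem_append_left _ h2
      have hmk : ∀ c ∈ c0 :: cs, get2 v c.1 c.2 = true := fun c hc => (hpend c hc).2
      have hD1 := done_step t v p (c0 :: cs) rest hShp hp hmk
      rw [hstep]
      refine ⟨⟨?_, ?_⟩, ?_, le_trans (le_max_left _ _) hble', ?_, ?_⟩
      · rw [hlen', length_markAll]
      · intro k; rw [hrow' k, rowlen_markAll]
      · intro c
        exact Iff.trans (hiff' c) (hD1 c).symm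
      · intro c hRF
        by_cases hcp : c = p
        · rw [hcp]
          exact le_trans (le_max_right _ _) hble'
        · rcases (hD1 c).mp (Or.inr hRF) with hg | hrf
          · rcases (hv'char c).mp hg with hvv | hcS
            · obtain ⟨q, hq, rv⟩ := hRF
              rcases rv_end t v rv with hcq | hcf
              · rcases (hp c).mp (hcq ▸ hq) with h1 | h2
                · exact absurd h1 hcp
                · exact hbound' c ⟨c, List.mem_append_left _ h2, RV.refl c⟩
              · exact absurd hvv (by simp [hcf])
            · exact hbound' c ⟨c, List.mem_append_right _ hcS, RV.refl c⟩
          · exact hbound' c hrf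
      · rcases hach' with hb1e | ⟨c, hcRF, hval⟩
        · rcases max_choice b (valT t p) with hmb | hms
          · left; rw [hb1e, hmb]
          · right
            exact ⟨p, ⟨p, hpmem, RV.refl p⟩, by rw [hb1e, hms]⟩
        · right
          obtain ⟨q, hq, rv'⟩ := hcRF
          have rvv := rv_mono t v (markAll v S) hmono rv'
          rcases List.mem_append.mp hq with hqr | hqS
          · exact ⟨c, ⟨q, (hp q).mpr (Or.inr hqr), rvv⟩, hval⟩
          · refine ⟨c, ⟨p, hpmem, ?_⟩, hval⟩
            exact rv_trans t v (RV.step (RV.refl p) (hSfacts q hqS).1 (hSfacts q hqS).2) rvv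

lemma get2_ext (v w : List (List Bool)) (hl : v.length = w.length)
    (hr : ∀ k : Nat, (v.getD k []).length = (w.getD k []).length)
    (hg : ∀ x y : Int, get2 v x y = get2 w x y) : v = w := by
  apply List.ext_getElem hl
  intro i h1 h2
  have hvi : v.getD i [] = v[i] := by
    rw [List.getD_eq_getElem?_getD, List.getElem?_eq_getElem h1, Option.getD_some]
  have hwi : w.getD i [] = w[i] := by
    rw [List.getD_eq_getElem?_getD, List.getElem?_eq_getElem h2, Option.getD_some]
  have hri : v[i].length = w[i].length := by
    have := hr i
    rwa [hvi, hwi] at this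
  apply List.ext_getElem hri
  intro j hj1 hj2
  have := hg (i : Int) (j : Int)
  unfold get2 at this
  rw [if_pos ⟨Int.natCast_nonneg i, Int.natCast_nonneg j⟩] at this
  rw [Int.toNat_natCast, Int.toNat_natCast, hvi, hwi] at this
  rwa [List.getD_eq_getElem?_getD, List.getD_eq_getElem?_getD,
    List.getElem?_eq_getElem hj1, List.getElem?_eq_getElem hj2,
    Option.getD_some, Option.getD_some] at this

lemma valT_A (t : List (List String)) (x y : Int) (h : cellAt t x y = "A") :
    valT t (x, y) = 1 := by
  unfold valT
  simp only []
  rw [h]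
  decide

lemma start_eq (t : List (List String)) (v : List (List Bool)) (hOk : OkT t)
    (hShp : Shp t v) (x y : Int) (hInT : InT t x y) (hA : cellAt t x y = "A") :
    bfsLoopA t (fuelFor (set2 v x y)) [((x, y), 1)] (set2 v x y) 1
      = bfsLoopB t (fuelFor (set2 v x y)) [(x, y)] (set2 v x y) 1 := by
  have hShp1 : Shp t (set2 v x y) := by
    constructor
    · rw [length_set2]; exact hShp.1
    · intro k hk; rw [rowlen_set2]; exact hShp.2 k hk
  have hInV : InV v x y := InT_InV t v hShp x y hInT
  have hmark : get2 (set2 v x y) x y = true := get2_set2_self v x y hInV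
  have hval1 : valT t (x, y) = 1 := valT_A t x y hA
  have hfuel : countFalse (set2 v x y) + 1 ≤ fuelFor (set2 v x y) := by
    have h1 := countFalse_le (set2 v x y)
    unfold fuelFor
    omega
  have HA := loopA_spec t hOk (fuelFor (set2 v x y)) [((x, y), 1)] (set2 v x y) 1 hShp1
    (by
      intro e he
      rw [List.mem_singleton] at he
      rw [he]
      exact ⟨hInT, hmark, hval1.symm⟩)
    (by simpa using hfuel)
  have HB := loopB_spec t hOk (fuelFor (set2 v x y)) [(x, y)] (set2 v x y) 1 hShp1
    (by
      intro c hc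
      rw [List.mem_singleton] at hc
      rw [hc]
      exact ⟨hInT, hmark⟩)
    (by simpa using hfuel)
  obtain ⟨⟨hAlen, hArow⟩, hAiff, hAble, hAbound, hAach⟩ := HA
  obtain ⟨⟨hBlen, hBrow⟩, hBiff, hBble, hBbound, hBach⟩ := HB
  have hmap : ([((x, y), (1 : Int))].map Prod.fst) = [(x, y)] := by simp
  rw [hmap] at hAiff hAbound hAach
  apply Prod.ext
  · apply get2_ext
    · rw [hAlen, hBlen]
    · intro k; rw [hArow k, hBrow k]
    · intro a b2
      have h12 : get2 (bfsLoopA t (fuelFor (set2 v x y)) [((x, y), 1)] (set2 v x y) 1).1 a b2 = true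
          ↔ get2 (bfsLoopB t (fuelFor (set2 v x y)) [(x, y)] (set2 v x y) 1).1 a b2 = true :=
        Iff.trans (hAiff (a, b2)) (hBiff (a, b2)).symm
      cases hga : get2 (bfsLoopA t (fuelFor (set2 v x y)) [((x, y), 1)] (set2 v x y) 1).1 a b2 <;>
        cases hgb : get2 (bfsLoopB t (fuelFor (set2 v x y)) [(x, y)] (set2 v x y) 1).1 a b2 <;>
        simp [hga, hgb] at h12 ⊢
  · apply le_antisymm
    · rcases hAach with h1 | ⟨c, hRF, _, heq⟩
      · rw [h1]; exact hBble
      · rw [heq]; exact hBbound c hRF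
    · rcases hBach with h1 | ⟨c, hRF, heq⟩
      · rw [h1]; exact hAble
      · rw [heq]
        obtain ⟨q, hq, rv⟩ := hRF
        rw [List.mem_singleton] at hq
        rcases rv_end t (set2 v x y) rv with hcq | hcf
        · rw [hcq, hq, hval1]
          exact hAble
        · exact hAbound c ⟨q, by simp [hq], rv⟩ hcf

-- ---- flattening the two nested scans over the grid ----
def cellsOf (t : List (List String)) : List (Int × Int) :=
  (List.range t.length).flatMap (fun i =>
    (List.range (t.getD i []).length).map (fun (j : Nat) => ((i : Int), (j : Int))))

lemma mem_cells (t : List (List String)) (c : Int × Int) :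
    c ∈ cellsOf t ↔ ∃ i j : Nat, i < t.length ∧ j < (t.getD i []).length
      ∧ c = ((i : Int), (j : Int)) := by
  unfold cellsOf
  simp only [List.mem_flatMap, List.mem_map, List.mem_range]
  constructor
  · rintro ⟨i, hi, j, hj, rfl⟩
    exact ⟨i, j, hi, hj, rfl⟩
  · rintro ⟨i, j, hi, hj, rfl⟩
    exact ⟨i, hi, j, hj, rfl⟩

lemma cellAt_nat (t : List (List String)) (i j : Nat) :
    cellAt t (i : Int) (j : Int) = (t.getD i []).getD j "" := by
  unfold cellAt
  rw [if_pos ⟨Int.natCast_nonneg i, Int.natCast_nonneg j⟩,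
    Int.toNat_natCast, Int.toNat_natCast]

lemma cells_InT (t : List (List String)) (c : Int × Int) (hc : c ∈ cellsOf t) :
    InT t c.1 c.2 := by
  obtain ⟨i, j, hi, hj, rfl⟩ := (mem_cells t c).mp hc
  exact ⟨Int.natCast_nonneg i, by simpa using hi, Int.natCast_nonneg j, by simpa using hj⟩

-- generic: a fold that appends matching elements builds the filtered list
lemma foldl_append_if_prop (t : List (List String)) :
    ∀ (l : List (Int × Int)) (acc : List (Int × Int)),
    l.foldl (fun acc c => if cellAt t c.1 c.2 = "A" then acc ++ [c] else acc) acc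
      = acc ++ l.filter (fun c => decide (cellAt t c.1 c.2 = "A")) := by
  intro l
  induction l with
  | nil => intro acc; simp
  | cons c l ih =>
    intro acc
    rw [List.foldl_cons, List.filter_cons]
    by_cases hc : cellAt t c.1 c.2 = "A"
    · rw [if_pos hc, ih, if_pos (by simpa using hc)]
      simp
    · rw [if_neg hc, ih, if_neg (by simpa using hc)]

-- generic: folding a guarded step equals folding the step over the filtered list
lemma foldl_if_filter (t : List (List String)) {β : Type}
    (f : β → (Int × Int) → β) :
    ∀ (l : List (Int × Int)) (st : β),
    l.foldl (fun st c => if cellAt t c.1 c.2 = "A" then f st c else st) st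
      = (l.filter (fun c => decide (cellAt t c.1 c.2 = "A"))).foldl f st := by
  intro l
  induction l with
  | nil => intro st; rfl
  | cons c l ih =>
    intro st
    rw [List.foldl_cons, List.filter_cons]
    by_cases hc : cellAt t c.1 c.2 = "A"
    · rw [if_pos hc, if_pos (by simpa using hc), List.foldl_cons, ih]
    · rw [if_neg hc, if_neg (by simpa using hc), ih]

lemma startsOf_eq (t : List (List String)) :
    startsOf t = (cellsOf t).filter (fun c => decide (cellAt t c.1 c.2 = "A")) := by
  have h2 : (cellsOf t).foldl
      (fun acc (c : Int × Int) => if cellAt t c.1 c.2 = "A" then acc ++ [c] else acc) []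
      = startsOf t := by
    unfold cellsOf startsOf
    rw [List.foldl_flatMap]
    apply List.foldl_ext
    intro acc i _
    rw [List.foldl_map]
  rw [← h2, foldl_append_if_prop t _ []]
  simp

-- the per-start step functions of the two outer loops (let-free; defeq to the lambdas)
def stepAf (t : List (List String)) (st : List (List Bool) × Int) (s : Int × Int) :
    List (List Bool) × Int :=
  ((bfsLoopA t (fuelFor (set2 st.1 s.1 s.2)) [((s.1, s.2), 1)] (set2 st.1 s.1 s.2) 1).1,
   max st.2 (bfsLoopA t (fuelFor (set2 st.1 s.1 s.2)) [((s.1, s.2), 1)] (set2 st.1 s.1 s.2) 1).2)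

def stepBf (t : List (List String)) (st : List (List Bool) × Int) (s : Int × Int) :
    List (List Bool) × Int :=
  ((bfsLoopB t (fuelFor (set2 st.1 s.1 s.2)) [(s.1, s.2)] (set2 st.1 s.1 s.2) 1).1,
   max st.2 (bfsLoopB t (fuelFor (set2 st.1 s.1 s.2)) [(s.1, s.2)] (set2 st.1 s.1 s.2) 1).2)

lemma shp_stepB (t : List (List String)) (hOk : OkT t) (st : List (List Bool) × Int)
    (c : Int × Int) (hShp : Shp t st.1) (hInT : InT t c.1 c.2)
    (hA : cellAt t c.1 c.2 = "A") : Shp t (stepBf t st c).1 := by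
  have hShp1 : Shp t (set2 st.1 c.1 c.2) := by
    constructor
    · rw [length_set2]; exact hShp.1
    · intro k hk; rw [rowlen_set2]; exact hShp.2 k hk
  have hInV : InV st.1 c.1 c.2 := InT_InV t st.1 hShp c.1 c.2 hInT
  have hmark : get2 (set2 st.1 c.1 c.2) c.1 c.2 = true := get2_set2_self st.1 c.1 c.2 hInV
  have hfuel : countFalse (set2 st.1 c.1 c.2) + 1 ≤ fuelFor (set2 st.1 c.1 c.2) := by
    have h1 := countFalse_le (set2 st.1 c.1 c.2)
    unfold fuelFor
    omega
  have HB := loopB_spec t hOk (fuelFor (set2 st.1 c.1 c.2)) [(c.1, c.2)] (set2 st.1 c.1 c.2) 1 hShp1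
    (by
      intro c' hc'
      rw [List.mem_singleton] at hc'
      rw [hc']
      exact ⟨hInT, hmark⟩)
    (by simpa using hfuel)
  obtain ⟨⟨hBlen, hBrow⟩, _, _, _, _⟩ := HB
  constructor
  · unfold stepBf
    rw [hBlen, length_set2]
    exact hShp.1
  · intro k hk
    unfold stepBf
    rw [hBrow k, rowlen_set2]
    exact hShp.2 k hk

lemma fold_eq (t : List (List String)) (hOk : OkT t) :
    ∀ (l : List (Int × Int)) (st : List (List Bool) × Int),
    (∀ c ∈ l, InT t c.1 c.2) → Shp t st.1 →
    l.foldl (fun st c => if cellAt t c.1 c.2 = "A" then stepAf t st c else st) st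
      = l.foldl (fun st c => if cellAt t c.1 c.2 = "A" then stepBf t st c else st) st := by
  intro l
  induction l with
  | nil => intro st _ _; rfl
  | cons c l ih =>
    intro st hl hShp
    rw [List.foldl_cons, List.foldl_cons]
    by_cases hc : cellAt t c.1 c.2 = "A"
    · rw [if_pos hc, if_pos hc]
      have hInT := hl c (by simp)
      have hstep : stepAf t st c = stepBf t st c := by
        unfold stepAf stepBf
        rw [start_eq t st.1 hOk hShp c.1 c.2 hInT hc]
      rw [hstep]
      exact ih (stepBf t st c) (fun c' hc' => hl c' (by simp [hc']))
        (shp_stepB t hOk st c hShp hInT hc)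
    · rw [if_neg hc, if_neg hc]
      exact ih st (fun c' hc' => hl c' (by simp [hc'])) hShp

lemma fold_noA (t : List (List String)) {β : Type} (f : β → (Int × Int) → β) :
    ∀ (l : List (Int × Int)) (st : β),
    (∀ c ∈ l, cellAt t c.1 c.2 ≠ "A") →
    l.foldl (fun st c => if cellAt t c.1 c.2 = "A" then f st c else st) st = st := by
  intro l
  induction l with
  | nil => intro st _; rfl
  | cons c l ih =>
    intro st hl
    rw [List.foldl_cons, if_neg (hl c (by simp))]
    exact ih st (fun c' hc' => hl c' (by simp [hc']))

-- ===== VERDICT (by name: the statement is the Claim_ definition above) =====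
theorem bfs_spec : Claim_equal_bfs := by
  unfold Claim_equal_bfs Spec_bfs
  intro t v hDom hPre
  have hOk := dom_okT t v hDom
  have hA : bfs t v = ((cellsOf t).foldl
      (fun st c => if cellAt t c.1 c.2 = "A" then stepAf t st c else st) (v, 0)).2 := by
    have h1 : bfs t v = ((startsOf t).foldl (stepAf t) (v, 0)).2 := rfl
    rw [h1, startsOf_eq, ← foldl_if_filter t (stepAf t) (cellsOf t) (v, 0)]
  have hB : bfs_alt t v = ((cellsOf t).foldl
      (fun st c => if cellAt t c.1 c.2 = "A" then stepBf t st c else st) (v, 0)).2 := by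
    unfold bfs_alt cellsOf
    rw [List.foldl_flatMap]
    apply congrArg Prod.snd
    apply List.foldl_ext
    intro st i _
    rw [List.foldl_map]
    rfl
  rw [hA, hB]
  by_cases hAex : ∃ r ∈ t, "A" ∈ r
  · obtain ⟨hlen, hrows⟩ := hPre hAex
    have hShp : Shp t v := ⟨hlen, fun k hk => hrows k (List.mem_range.mpr hk)⟩
    rw [fold_eq t hOk (cellsOf t) (v, 0) (fun c hc => cells_InT t c hc) hShp]
  · have hno : ∀ c ∈ cellsOf t, cellAt t c.1 c.2 ≠ "A" := by
      intro c hc hAc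
      apply hAex
      obtain ⟨i, j, hi, hj, rfl⟩ := (mem_cells t c).mp hc
      rw [cellAt_nat] at hAc
      refine ⟨t.getD i [], ?_, ?_⟩
      · rw [List.getD_eq_getElem?_getD, List.getElem?_eq_getElem hi, Option.getD_some]
        exact List.getElem_mem hi
      · rw [← hAc]
        rw [List.getD_eq_getElem?_getD (l := t.getD i []),
          List.getElem?_eq_getElem hj, Option.getD_some]
        exact List.getElem_mem hj
    rw [fold_noA t (stepAf t) _ _ hno, fold_noA t (stepBf t) _ _ hno]
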